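-- pv_equiv track=rewrite | github.com/Mohamed-Dhouib/TDOC | generation_pipeline/generate_data.py | group_words_and_eliminate_chars
-- ===== SOURCE A (Python) =====
-- from collections import defaultdict
--
-- def group_words_and_eliminate_chars(line, max_len=None):
--     """Group characters into contiguous word segments."""
--     line = sorted(line, key=lambda x: x['W_d'])
--
--     groups_by_len = defaultdict(list)
--     n = len(line)
--     max_window = max_len or n
--
--     for i in range(n):
--         upper = min(n + 1, i + max_window + 1)
--         for j in range(i + 2, upper):
--             group = line[i:j]
--             groups_by_len[j - i].append(group)
--
--     return dict(groups_by_len)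
-- ===== SOURCE B (Python) =====
-- def group_words_and_eliminate_chars(line, max_len=None):
--     """Group characters into contiguous word segments."""
--     line = sorted(line, key=lambda x: x['W_d'])
--     n = len(line)
--     max_window = max_len or n
--     result = {}
--     windows = [[c] for c in line]
--     for L in range(2, min(n, max_window) + 1):
--         windows = [w + [c] for w, c in zip(windows, line[L - 1:])]
--         result[L] = windows
--     return result
-- ===== Notes on version B (the rewrite author's own statement) =====
-- stated objective: alternative
-- what changed: B builds each length's windows incrementally by zipping the previous length's windows with the shifted list and appending one element (dynamic window extension), instead of A's nested start-index loops cutting every slice independently into a defaultdict.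
import Mathlib
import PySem

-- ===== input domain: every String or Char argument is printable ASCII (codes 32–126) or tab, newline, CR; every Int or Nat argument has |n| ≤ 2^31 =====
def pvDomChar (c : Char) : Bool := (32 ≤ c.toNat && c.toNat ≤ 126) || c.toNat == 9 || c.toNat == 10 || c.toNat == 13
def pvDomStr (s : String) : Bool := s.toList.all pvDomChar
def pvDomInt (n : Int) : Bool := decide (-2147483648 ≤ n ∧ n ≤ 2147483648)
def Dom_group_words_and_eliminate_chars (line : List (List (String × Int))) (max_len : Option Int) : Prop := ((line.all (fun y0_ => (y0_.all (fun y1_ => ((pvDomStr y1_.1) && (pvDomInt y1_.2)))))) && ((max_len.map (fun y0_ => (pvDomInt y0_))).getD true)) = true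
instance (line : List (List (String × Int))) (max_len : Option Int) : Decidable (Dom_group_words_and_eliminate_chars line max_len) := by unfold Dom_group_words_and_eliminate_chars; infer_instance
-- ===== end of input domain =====

-- B grows each length's windows from the previous length's windows (zip with the shifted
-- list, append one element) instead of A's nested start-index loops slicing each group
-- independently into a defaultdict; objective: alternative. Return-value equivalence only.

-- ===== PORT A =====
def group_words_and_eliminate_chars (line : List (List (String × Int))) (max_len : Option Int) : List (Int × List (List (List (String × Int)))) :=
  -- line = sorted(line, key=lambda x: x['W_d'])  (x['W_d'] raises on a missing key: Pre_ requires it)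
  let line' := PySem.List.sorted line (fun x => (PySem.Dict.mk x).getD "W_d" 0) false
  let n : Int := line'.length
  -- max_window = max_len or n
  let max_window : Int := match max_len with
    | none => n
    | some m => if m = 0 then n else m
  let d := (PySem.List.pyRange 0 n 1).foldl (fun d i =>
      (PySem.List.pyRange (i + 2) (min (n + 1) (i + max_window + 1)) 1).foldl (fun d j =>
        d.modify (j - i) [] (· ++ [PySem.List.slice line' (some i) (some j)])) d)
    PySem.Dict.empty
  d.items

-- ===== PORT B =====
def group_words_and_eliminate_chars_alt (line : List (List (String × Int))) (max_len : Option Int) : List (Int × List (List (List (String × Int)))) :=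
  let line' := PySem.List.sorted line (fun x => (PySem.Dict.mk x).getD "W_d" 0) false
  let n : Int := line'.length
  let max_window : Int := match max_len with
    | none => n
    | some m => if m = 0 then n else m
  -- state = (result dict, windows of the current length); windows start as the singletons
  let st := (PySem.List.pyRange 2 (min n max_window + 1) 1).foldl
    (fun (st : PySem.Dict Int (List (List (List (String × Int)))) × List (List (List (String × Int)))) L =>
      let ws := (st.2.zip (PySem.List.slice line' (some (L - 1)) none)).map (fun p => p.1 ++ [p.2])
      (st.1.insert L ws, ws))
    (PySem.Dict.empty, line'.map (fun c => [c]))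
  st.1.items

-- ===== PRECONDITION & SPEC =====
-- Pre_ excludes exactly the inputs where Python A raises KeyError: an element dict without a "W_d" key.
def Pre_group_words_and_eliminate_chars (line : List (List (String × Int))) (max_len : Option Int) : Prop :=
  ∀ x ∈ line, "W_d" ∈ x.map Prod.fst
instance (line : List (List (String × Int))) (max_len : Option Int) : Decidable (Pre_group_words_and_eliminate_chars line max_len) := by unfold Pre_group_words_and_eliminate_chars; infer_instance

def pvWitness_group_words_and_eliminate_chars : (List (List (String × Int))) × Option Int :=
  ([[("W_d", 1)], [("W_d", 0)], [("W_d", 2)]], none)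

def Spec_group_words_and_eliminate_chars (line : List (List (String × Int))) (max_len : Option Int) (out : List (Int × List (List (List (String × Int))))) : Prop := out = group_words_and_eliminate_chars_alt line max_len
instance (line : List (List (String × Int))) (max_len : Option Int) (out : List (Int × List (List (List (String × Int))))) : Decidable (Spec_group_words_and_eliminate_chars line max_len out) := by unfold Spec_group_words_and_eliminate_chars; infer_instance

-- ===== CLAIM (what is proved, stated in full; the proofs are below) =====
def Claim_equal_group_words_and_eliminate_chars : Prop := ∀ (line : List (List (String × Int))) (max_len : Option Int), Dom_group_words_and_eliminate_chars line max_len → Pre_group_words_and_eliminate_chars line max_len → Spec_group_words_and_eliminate_chars line max_len (group_words_and_eliminate_chars line max_len)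

-- ===== LEMMAS AND PROOFS =====

-- the canonical per-length window list both ports are reduced to
def pvW {alpha : Type} (s : List alpha) (L : Int) : List (List alpha) :=
  (PySem.List.pyRange 0 ((s.length : Int) - L + 1) 1).map
    (fun i => PySem.List.slice s (some i) (some (i + L)))

-- a nested loop is a loop over the flattened list
theorem pvFoldlFlat {beta gamma delta : Type} (l : List beta) (g : beta -> List gamma) (f : delta -> gamma -> delta) (init : delta) :
    l.foldl (fun d b => (g b).foldl f d) init = (l.flatMap g).foldl f init := by
  induction l generalizing init with
  | nil => rfl
  | cons x xs ih => simp [List.flatMap_cons, List.foldl_append, ih]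

theorem pvFlatMapCongr {beta gamma : Type} (l : List beta) (f g : beta -> List gamma) (h : forall x, x ∈ l -> f x = g x) :
    l.flatMap f = l.flatMap g := by
  induction l with
  | nil => rfl
  | cons x xs ih => simp [List.flatMap_cons, h x (by simp), ih (fun y hy => h y (by simp [hy]))]

theorem pvFlatMapSingleton {beta gamma : Type} (l : List beta) (f : beta -> gamma) :
    l.flatMap (fun x => [f x]) = l.map f := by
  induction l with
  | nil => rfl
  | cons x xs ih => simp [List.flatMap_cons, ih]

theorem pvFlatMapNil {beta gamma : Type} (l : List beta) :
    l.flatMap (fun _ => ([] : List gamma)) = [] := by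
  induction l with
  | nil => rfl
  | cons x xs ih => simp [List.flatMap_cons, ih]

theorem pvFilterFlatMap {beta gamma : Type} (l : List beta) (g : beta -> List gamma) (p : gamma -> Bool) :
    (l.flatMap g).filter p = l.flatMap (fun b => (g b).filter p) := by
  induction l with
  | nil => rfl
  | cons x xs ih => simp [List.flatMap_cons, List.filter_append, ih]

theorem pvMapFlatMap {beta gamma delta : Type} (l : List beta) (g : beta -> List gamma) (f : gamma -> delta) :
    (l.flatMap g).map f = l.flatMap (fun b => (g b).map f) := by
  induction l with
  | nil => rfl
  | cons x xs ih => simp [List.flatMap_cons, ih]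

theorem pvFoldlPairs {nu : Type} [BEq Int] (l : List Int) (k : Int -> Int) (v : Int -> nu)
    (d : PySem.Dict Int (List nu)) :
    l.foldl (fun d j => d.modify (k j) [] (· ++ [v j])) d
      = (l.map (fun j => (k j, v j))).foldl (fun d p => d.modify p.1 [] (· ++ [p.2])) d := by
  induction l generalizing d with
  | nil => rfl
  | cons x xs ih => simp only [List.foldl_cons, List.map_cons, ih]

-- filter (== c) on a strictly increasing list keeps at most the one hit
theorem pvFilterBeqPairwise (l : List Int) (c : Int) (h : l.Pairwise (· < ·)) :
    l.filter (fun x => x == c) = if c ∈ l then [c] else [] := by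
  induction l with
  | nil => simp
  | cons x xs ih =>
    rcases List.pairwise_cons.mp h with ⟨hx, hxs⟩
    by_cases hxc : x = c
    · subst hxc
      have hnil : xs.filter (fun y => y == x) = [] := by
        apply List.filter_eq_nil_iff.mpr
        intro y hy
        simp only [beq_iff_eq]
        exact fun e => absurd (hx y hy) (by omega)
      simp [hnil]
    · have hcx : (x == c) = false := by simp [hxc]
      rw [List.filter_cons]
      simp only [hcx, Bool.false_eq_true, if_false, ih hxs, List.mem_cons]
      have : (c = x ∨ c ∈ xs) ↔ c ∈ xs := by
        constructor
        · rintro (rfl | h2)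
          · exact absurd rfl hxc
          · exact h2
        · exact Or.inr
      simp [this]

-- Set.update by a subset is a no-op
theorem pvUpdateSubset (s : PySem.Set Int) (ys : List Int) (h : forall y, y ∈ ys -> y ∈ s) :
    PySem.Set.update s ys = s := by
  rw [PySem.Set.update_eq_append_filter]
  have hnil : (PySem.Set.ofList ys).filter (fun y => !(PySem.Set.contains s y)) = [] := by
    rw [List.filter_eq_nil_iff]
    intro y hy
    have hmem : y ∈ s := h y (by simpa [PySem.Set.mem_ofList] using hy)
    simp [hmem]
  rw [hnil, List.append_nil]

-- the map (j - i) of a shifted range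
theorem pvRangeShift (a b i : Int) :
    (PySem.List.pyRange a b 1).map (fun j => j - i) = PySem.List.pyRange (a - i) (b - i) 1 := by
  simp only [PySem.List.pyRange_one, List.map_map]
  have h1 : b - i - (a - i) = b - a := by ring
  rw [h1]
  apply List.map_congr_left
  intro k _
  simp only [Function.comp]
  omega

-- the keys of A's dict appear first at i = 0, in increasing-length order
theorem pvKeysEq (n W : Int) (hn : 0 ≤ n) :
    PySem.Set.ofList ((PySem.List.pyRange 0 n 1).flatMap
        (fun i => PySem.List.pyRange (i + 2 - i) (min (n + 1) (i + W + 1) - i) 1))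
      = PySem.List.pyRange 2 (min n W + 1) 1 := by
  rcases eq_or_lt_of_le hn with h0 | h0
  · rw [PySem.List.pyRange_one_eq_nil (by omega), PySem.List.pyRange_one_eq_nil (by omega)]
    rfl
  · rw [PySem.List.pyRange_one_cons h0, List.flatMap_cons]
    have hb : min (n + 1) (0 + W + 1) - 0 = min n W + 1 := by omega
    have ha : (0 : Int) + 2 - 0 = 2 := by omega
    rw [hb, ha, PySem.Set.ofList_append,
      PySem.Set.ofList_eq_self_of_nodup _ (PySem.List.nodup_pyRange_one _ _)]
    apply pvUpdateSubset
    intro y hy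
    simp only [List.mem_flatMap] at hy
    obtain ⟨i, hi, hyi⟩ := hy
    rw [PySem.List.mem_pyRange_one] at hi hyi
    rw [PySem.List.mem_pyRange_one]
    omega

-- the inner loop of A keeps exactly the one window of length L starting at i (if in range)
theorem pvInnerFilter {beta : Type} (g : Int -> beta) (a b i L : Int) :
    ((((PySem.List.pyRange a b 1).map (fun j => ((j - i : Int), g j))).filter
        (fun p => p.1 == L)).map (·.2))
      = if a ≤ i + L ∧ i + L < b then [g (i + L)] else [] := by
  rw [List.filter_map]
  have hc : forall j, j ∈ PySem.List.pyRange a b 1 ->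
      ((fun (p : Int × beta) => p.1 == L) ∘ (fun j => ((j - i : Int), g j))) j = (j == i + L) := by
    intro j _
    simp only [Function.comp]
    rw [Bool.eq_iff_iff]
    simp only [beq_iff_eq]
    omega
  rw [List.filter_congr hc]
  rw [pvFilterBeqPairwise _ _ (PySem.List.pairwise_lt_pyRange_one _ _)]
  by_cases hm : a ≤ i + L ∧ i + L < b
  · rw [if_pos (PySem.List.mem_pyRange_one.mpr hm), if_pos hm]
    simp
  · rw [if_neg (fun h => hm (PySem.List.mem_pyRange_one.mp h)), if_neg hm]
    simp

-- the per-key slice list of A's dict is the canonical window list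
theorem pvValEq {beta : Type} (g : Int -> Int -> beta) (n W L : Int)
    (h2 : 2 ≤ L) (hLn : L ≤ n) (hLW : L ≤ W) :
    ((((PySem.List.pyRange 0 n 1).flatMap
        (fun i => (PySem.List.pyRange (i + 2) (min (n + 1) (i + W + 1)) 1).map
          (fun j => ((j - i : Int), g i j)))).filter (fun p => p.1 == L)).map (·.2))
      = (PySem.List.pyRange 0 (n - L + 1) 1).map (fun i => g i (i + L)) := by
  rw [pvFilterFlatMap, pvMapFlatMap]
  have hsplit : PySem.List.pyRange 0 n 1
      = PySem.List.pyRange 0 (n - L + 1) 1 ++ PySem.List.pyRange (n - L + 1) n 1 :=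
    PySem.List.pyRange_one_append 0 (n - L + 1) n (by omega) (by omega)
  rw [hsplit, List.flatMap_append]
  have hfst : (PySem.List.pyRange 0 (n - L + 1) 1).flatMap
      (fun i => (((PySem.List.pyRange (i + 2) (min (n + 1) (i + W + 1)) 1).map
        (fun j => ((j - i : Int), g i j))).filter (fun p => p.1 == L)).map (·.2))
      = (PySem.List.pyRange 0 (n - L + 1) 1).flatMap (fun i => [g i (i + L)]) := by
    apply pvFlatMapCongr
    intro i hi
    rw [PySem.List.mem_pyRange_one] at hi
    rw [pvInnerFilter (fun j => g i j) (i + 2) (min (n + 1) (i + W + 1)) i L]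
    rw [if_pos (by omega)]
  have hsnd : (PySem.List.pyRange (n - L + 1) n 1).flatMap
      (fun i => (((PySem.List.pyRange (i + 2) (min (n + 1) (i + W + 1)) 1).map
        (fun j => ((j - i : Int), g i j))).filter (fun p => p.1 == L)).map (·.2))
      = (PySem.List.pyRange (n - L + 1) n 1).flatMap (fun _ => ([] : List beta)) := by
    apply pvFlatMapCongr
    intro i hi
    rw [PySem.List.mem_pyRange_one] at hi
    rw [pvInnerFilter (fun j => g i j) (i + 2) (min (n + 1) (i + W + 1)) i L]
    rw [if_neg (by omega)]
  rw [hfst, hsnd, pvFlatMapSingleton, pvFlatMapNil, List.append_nil]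

-- A's side: the nested defaultdict loops produce the canonical map, key by key
theorem pvMainA {alpha : Type} (s : List alpha) (W : Int) :
    ((PySem.List.pyRange 0 (s.length : Int) 1).foldl (fun d i =>
        (PySem.List.pyRange (i + 2) (min ((s.length : Int) + 1) (i + W + 1)) 1).foldl (fun d j =>
          d.modify (j - i) [] (· ++ [PySem.List.slice s (some i) (some j)])) d)
      (PySem.Dict.empty : PySem.Dict Int (List (List alpha)))).items
    = (PySem.List.pyRange 2 (min (s.length : Int) W + 1) 1).map (fun L => (L, pvW s L)) := by
  have hn : (0 : Int) ≤ (s.length : Int) := Int.natCast_nonneg _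
  simp only [pvW]
  generalize hgen : ((s.length : Int)) = n at hn ⊢
  have hstep : forall (d : PySem.Dict Int (List (List alpha))) (i : Int),
      (PySem.List.pyRange (i + 2) (min (n + 1) (i + W + 1)) 1).foldl (fun d j =>
          d.modify (j - i) [] (· ++ [PySem.List.slice s (some i) (some j)])) d
        = ((PySem.List.pyRange (i + 2) (min (n + 1) (i + W + 1)) 1).map
            (fun j => ((j - i : Int), PySem.List.slice s (some i) (some j)))).foldl
            (fun d p => d.modify p.1 [] (· ++ [p.2])) d := by
    intro d i
    exact pvFoldlPairs _ (fun j => j - i) (fun j => PySem.List.slice s (some i) (some j)) d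
  simp only [hstep]
  rw [pvFoldlFlat]
  set ps := (PySem.List.pyRange 0 n 1).flatMap
      (fun i => (PySem.List.pyRange (i + 2) (min (n + 1) (i + W + 1)) 1).map
        (fun j => ((j - i : Int), PySem.List.slice s (some i) (some j)))) with hps
  have hkeys : ((ps.foldl (fun d p => d.modify p.1 [] (· ++ [p.2]))
      (PySem.Dict.empty : PySem.Dict Int (List (List alpha)))).keys)
      = PySem.List.pyRange 2 (min n W + 1) 1 := by
    rw [PySem.Dict.keys_foldl_modify_key ps Prod.fst]
    rw [PySem.Dict.keys_empty, PySem.Set.update_nil_left]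
    have hmap : ps.map Prod.fst = (PySem.List.pyRange 0 n 1).flatMap
        (fun i => PySem.List.pyRange (i + 2 - i) (min (n + 1) (i + W + 1) - i) 1) := by
      rw [hps, pvMapFlatMap]
      apply pvFlatMapCongr
      intro i _
      rw [List.map_map]
      exact pvRangeShift (i + 2) (min (n + 1) (i + W + 1)) i
    rw [hmap]
    exact pvKeysEq n W hn
  have hnodup : ((ps.foldl (fun d p => d.modify p.1 [] (· ++ [p.2]))
      (PySem.Dict.empty : PySem.Dict Int (List (List alpha)))).keys).Nodup := by
    rw [hkeys]
    exact PySem.List.nodup_pyRange_one _ _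
  rw [PySem.Dict.items_eq_map_keys _ hnodup []]
  rw [hkeys]
  apply List.map_congr_left
  intro L hL
  rw [PySem.List.mem_pyRange_one] at hL
  refine Prod.ext rfl ?_
  simp only
  rw [PySem.Dict.getD_foldl_modify_append, PySem.Dict.getD_empty, List.nil_append]
  rw [hps]
  exact pvValEq (fun i j => PySem.List.slice s (some i) (some j)) n W L
    (by omega) (by omega) (by omega)

-- pvW over Nat bounds: plain range/drop/take form (1 ≤ L ≤ len)
theorem pvW_nat {alpha : Type} (s : List alpha) (L : Nat) (hL : L ≤ s.length) :
    pvW s (L : Int) = (List.range (s.length - L + 1)).map (fun i => (s.drop i).take L) := by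
  unfold pvW
  have hb : ((s.length : Int) - L + 1) = ((s.length - L + 1 : Nat) : Int) := by
    push_cast [Nat.sub_add_cancel] ; omega
  rw [hb, PySem.List.pyRange_zero_natCast, List.map_map]
  apply List.map_congr_left
  intro i _
  simp only [Function.comp]
  exact PySem.List.slice_natCast_add s i L

-- the singleton windows are the canonical windows of length 1
theorem pvW_one {alpha : Type} (s : List alpha) : s.map (fun c => [c]) = pvW s 1 := by
  rcases Nat.eq_zero_or_pos s.length with h0 | h0
  · rw [List.eq_nil_of_length_eq_zero h0]; rfl
  · have h := pvW_nat s 1 h0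
    norm_num at h
    rw [h]
    apply List.ext_getElem
    · simp; omega
    · intro i hi hi'
      simp only [List.getElem_map, List.getElem_range]
      have hlt : i < s.length := by simpa using hi
      rw [List.take_one, List.head?_drop, List.getElem?_eq_getElem hlt]
      rfl

-- extending the windows of length L-1 by one zipped element gives the windows of length L
theorem pvW_step {alpha : Type} (s : List alpha) (L : Int) (h2 : 2 ≤ L) (hLn : L ≤ (s.length : Int)) :
    ((pvW s (L - 1)).zip (PySem.List.slice s (some (L - 1)) none)).map (fun p => p.1 ++ [p.2])
      = pvW s L := by
  obtain ⟨K, rfl⟩ : ∃ K : Nat, L = (K : Int) := ⟨L.toNat, by omega⟩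
  have hK2 : 2 ≤ K := by exact_mod_cast h2
  have hKn : K ≤ s.length := by exact_mod_cast hLn
  have hL1 : (K : Int) - 1 = ((K - 1 : Nat) : Int) := by omega
  rw [hL1, pvW_nat s (K - 1) (by omega), pvW_nat s K hKn, PySem.List.slice_from_natCast]
  apply List.ext_getElem
  · simp [List.length_zip]; omega
  · intro i hi hi'
    simp only [List.getElem_map, List.getElem_zip, List.getElem_range, List.getElem_drop,
      List.length_map, List.length_zip, List.length_range, List.length_drop, lt_min_iff] at hi ⊢
    have hi2 : i < s.length - K + 1 := by simpa using hi'
    have hlt : K - 1 < (s.drop i).length := by simp; omega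
    have e1 : s[K - 1 + i] = (s.drop i)[K - 1]'hlt := by
      simp only [List.getElem_drop]
      simp only [show K - 1 + i = i + (K - 1) from by omega]
    rw [e1]
    have := List.take_concat_get (l := s.drop i) (i := K - 1) (h := hlt)
    simpa [List.concat_eq_append, show K - 1 + 1 = K from by omega] using this

-- the dict component of B's fold, by induction on the remaining lengths
theorem pvFoldB_fst {alpha : Type} (s : List alpha) (k : Nat) :
    ∀ (a : Int) (d : PySem.Dict Int (List (List alpha))), 2 ≤ a → a + k ≤ (s.length : Int) + 1 →
    ((PySem.List.pyRange a (a + k) 1).foldl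
        (fun (st : PySem.Dict Int (List (List alpha)) × List (List alpha)) L =>
          let ws := (st.2.zip (PySem.List.slice s (some (L - 1)) none)).map (fun p => p.1 ++ [p.2])
          (st.1.insert L ws, ws))
        (d, pvW s (a - 1))).1
      = (PySem.List.pyRange a (a + k) 1).foldl (fun d L => d.insert L (pvW s L)) d := by
  induction k with
  | zero =>
    intro a d _ _
    rw [PySem.List.pyRange_one_eq_nil (by omega)]
    rfl
  | succ m ih =>
    intro a d ha hb
    rw [PySem.List.pyRange_one_cons (by omega)]
    simp only [List.foldl_cons]
    have hws : ((pvW s (a - 1)).zip (PySem.List.slice s (some (a - 1)) none)).map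
        (fun p => p.1 ++ [p.2]) = pvW s a := pvW_step s a ha (by push_cast at hb ⊢; omega)
    rw [hws]
    have ha1 : a + ((m + 1 : Nat) : Int) = (a + 1) + (m : Int) := by push_cast; ring
    rw [ha1]
    have := ih (a + 1) (d.insert a (pvW s a)) (by omega) (by push_cast at hb ⊢; omega)
    have hsub : (a + 1 : Int) - 1 = a := by ring
    rw [hsub] at this
    exact this

-- B's side: the incremental fold produces the canonical map too
theorem pvMainB {alpha : Type} (s : List alpha) (W : Int) :
    (((PySem.List.pyRange 2 (min (s.length : Int) W + 1) 1).foldl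
        (fun (st : PySem.Dict Int (List (List alpha)) × List (List alpha)) L =>
          let ws := (st.2.zip (PySem.List.slice s (some (L - 1)) none)).map (fun p => p.1 ++ [p.2])
          (st.1.insert L ws, ws))
        (PySem.Dict.empty, s.map (fun c => [c]))).1).items
      = (PySem.List.pyRange 2 (min (s.length : Int) W + 1) 1).map (fun L => (L, pvW s L)) := by
  set n : Int := (s.length : Int) with hn
  by_cases hb : 2 ≤ min n W + 1
  · have hk : min n W + 1 = 2 + ((min n W - 1).toNat : Int) := by omega
    rw [pvW_one]
    have h1 : pvW s 1 = pvW s ((2 : Int) - 1) := by norm_num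
    rw [h1, hk]
    rw [pvFoldB_fst s (min n W - 1).toNat 2 PySem.Dict.empty (by omega) (by omega)]
    rw [← hk]
    have := PySem.Dict.items_foldl_insert_fresh
      (l := PySem.List.pyRange 2 (min n W + 1) 1)
      (k := fun L => L) (v := fun L => pvW s L)
      (d := (PySem.Dict.empty : PySem.Dict Int (List (List alpha))))
      (fun a _ => PySem.Dict.contains_empty a)
      (by simpa using PySem.List.nodup_pyRange_one (2 : Int) (min n W + 1))
    simpa using this
  · rw [PySem.List.pyRange_one_eq_nil (by omega)]
    rfl

-- ===== VERDICT (by name: the statement is the Claim_ definition above) =====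
theorem group_words_and_eliminate_chars_spec : Claim_equal_group_words_and_eliminate_chars := by
  intro line max_len _ _
  simp only [Spec_group_words_and_eliminate_chars, group_words_and_eliminate_chars,
    group_words_and_eliminate_chars_alt]
  rw [pvMainA, pvMainB]
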